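-- pv_equiv track=rewrite | github.com/oliben67/my_libs | lists/inserts.py | insert_before
-- ===== SOURCE A (Python) =====
-- from itertools import groupby
--
-- def flatten(lst):
--     """
--     Flattens a nested list into a single list.
--
--     :param lst: The nested list to be flattened.
--     :type lst: ``lst``
--     :rtype: ``lst``
--     """
--     return [elem for sub_list in lst for elem in sub_list]
--
-- def insert_before(lst, sub, elem, _all=False):
--     """
--     Inserts a sublist `sub` before the first occurrence of `elem` in the given list `lst`.
--     If `_all` is True, inserts `sub` before all occurrences of `elem` in `lst`.
--
--     :param lst: The list to insert into.
--     :type lst: ``lst``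
--     :param sub: The list to insert.
--     :type sub: ``lst``
--     :param elem: The element to search for in 'lst'.
--     :type elem: ``Any``
--     :param _all: If True, insert before all occurrences of 'elem'. Defaults to False.
--     :type _all: ``bool``
--     :rtype: ``lst``
--     """
--     if isinstance(lst, str):
--         return insert_before(
--             [c for c in lst],
--             [c for c in sub] if isinstance(sub, str) else sub,
--             elem,
--             _all=_all,
--         )
--
--     if not _all:
--         idx = lst.index(elem)
--         return lst[:idx] + sub + lst[idx:]
--
--     split_lst = [
--         list(group if not k else []) for k, group in groupby(lst, lambda x: x == elem)
--     ]
--     return flatten(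
--         [
--             sub + [elem] + sub_list if not sub_list else sub_list
--             for sub_list in split_lst
--         ]
--     )
-- ===== SOURCE B (Python) =====
-- def insert_before(lst, sub, elem, _all=False):
--     if isinstance(lst, str):
--         lst = list(lst)
--         if isinstance(sub, str):
--             sub = list(sub)
--     if not _all:
--         idx = lst.index(elem)
--         return lst[:idx] + sub + lst[idx:]
--     return [y for x in lst for y in (sub + [x] if x == elem else [x])]
-- ===== Notes on version B (the rewrite author's own statement) =====
-- stated objective: simpler
-- what changed: The _all=True groupby/split/flatten pipeline is replaced by a single flat comprehension that emits sub before each occurrence of elem, which also fixes A's deletion of repeated adjacent elems.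
-- intended difference: On _all=True inputs where lst contains two adjacent occurrences of elem, A collapses each run of consecutive elems into a single elem preceded by one copy of sub (e.g. A([1,1],[7],1,True)=[7,1]), while B inserts sub before every occurrence and keeps all elements ([7,1,7,1]), which is what the docstring 'inserts sub before all occurrences' promises. — e.g. on insert_before([1, 1], [7], 1, true): A returns [7, 1], B returns [7, 1, 7, 1]
import Mathlib
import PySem

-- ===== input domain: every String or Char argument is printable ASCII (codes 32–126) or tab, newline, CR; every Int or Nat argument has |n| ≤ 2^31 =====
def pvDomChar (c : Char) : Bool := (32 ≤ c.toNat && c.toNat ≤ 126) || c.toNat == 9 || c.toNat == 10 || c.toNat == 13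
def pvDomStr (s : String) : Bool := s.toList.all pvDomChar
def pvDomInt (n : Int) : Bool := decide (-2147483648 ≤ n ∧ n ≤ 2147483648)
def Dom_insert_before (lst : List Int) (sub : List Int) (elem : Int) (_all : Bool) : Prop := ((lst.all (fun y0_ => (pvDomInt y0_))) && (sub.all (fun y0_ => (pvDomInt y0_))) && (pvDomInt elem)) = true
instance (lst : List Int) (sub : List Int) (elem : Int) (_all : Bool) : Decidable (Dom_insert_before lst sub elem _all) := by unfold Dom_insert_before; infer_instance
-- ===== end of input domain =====

-- B replaces A's groupby/split/flatten pipeline for _all=True by one flat comprehension inserting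
-- sub before every occurrence of elem (simpler); A's collapsing of adjacent elem-runs is stated as
-- an intended difference (D_), not reproduced.


-- ===== PORT A =====
-- flatten helper: [elem for sub_list in lst for elem in sub_list]
def pvFlatten (l : List (List Int)) : List Int := l.flatMap id

-- itertools.groupby(lst, lambda x: x == elem) as (key, list(group)) pairs; groups are maximal
-- runs of equal key, built here by structural recursion from the right.
def pvRuns (elem : Int) : List Int → List (Bool × List Int)
  | [] => []
  | x :: xs =>
    match pvRuns elem xs with
    | [] => [(x == elem, [x])]
    | (k, g) :: rest =>
      if (x == elem) == k then (k, x :: g) :: rest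
      else (x == elem, [x]) :: (k, g) :: rest

-- The isinstance(lst, str) branch is dead on this List Int domain and is not ported.
def insert_before (lst : List Int) (sub : List Int) (elem : Int) (_all : Bool) : List Int :=
  if _all = false then
    match PySem.List.index? lst elem with
    | none => []  -- lst.index(elem) raises ValueError: excluded by Pre_
    | some idx =>
        PySem.List.slice lst none (some (idx : Int)) ++ sub ++
          PySem.List.slice lst (some (idx : Int)) none
  else
    let split_lst := (pvRuns elem lst).map (fun kg => if kg.1 then ([] : List Int) else kg.2)
    pvFlatten (split_lst.map (fun s => if s.isEmpty then sub ++ [elem] ++ s else s))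

-- ===== PORT B =====
def insert_before_alt (lst : List Int) (sub : List Int) (elem : Int) (_all : Bool) : List Int :=
  if _all = false then
    match PySem.List.index? lst elem with
    | none => []  -- lst.index(elem) raises ValueError: excluded by Pre_
    | some idx =>
        PySem.List.slice lst none (some (idx : Int)) ++ sub ++
          PySem.List.slice lst (some (idx : Int)) none
  else
    lst.flatMap (fun x => if x == elem then sub ++ [x] else [x])

-- ===== PRECONDITION & SPEC =====
-- Pre_ excludes only inputs where A (and B) raise ValueError: _all=False with elem not in lst.
def Pre_insert_before (lst : List Int) (sub : List Int) (elem : Int) (_all : Bool) : Prop :=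
  _all = true ∨ elem ∈ lst
instance (lst : List Int) (sub : List Int) (elem : Int) (_all : Bool) : Decidable (Pre_insert_before lst sub elem _all) := by unfold Pre_insert_before; infer_instance
def pvWitness_insert_before : List Int × List Int × Int × Bool := ([1, 2, 3], [9], 2, false)

-- True iff lst has two adjacent occurrences of elem (inspects the input only).
def pvAdjDup (elem : Int) : List Int → Bool
  | x :: y :: xs => (x == elem && y == elem) || pvAdjDup elem (y :: xs)
  | _ => false

-- On _all=True inputs where lst contains two adjacent occurrences of elem, A collapses each run of
-- consecutive elems into a single elem preceded by one copy of sub (deleting elements), while B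
-- inserts sub before every occurrence and keeps all elements, as the docstring promises.
def D_insert_before (lst : List Int) (sub : List Int) (elem : Int) (_all : Bool) : Prop :=
  _all = true ∧ pvAdjDup elem lst = true
instance (lst : List Int) (sub : List Int) (elem : Int) (_all : Bool) : Decidable (D_insert_before lst sub elem _all) := by unfold D_insert_before; infer_instance

def Spec_insert_before (lst : List Int) (sub : List Int) (elem : Int) (_all : Bool) (out : List Int) : Prop := ¬ D_insert_before lst sub elem _all → out = insert_before_alt lst sub elem _all
instance (lst : List Int) (sub : List Int) (elem : Int) (_all : Bool) (out : List Int) : Decidable (Spec_insert_before lst sub elem _all out) := by unfold Spec_insert_before; infer_instance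

def pvDiffWitness_insert_before : List Int × List Int × Int × Bool := ([1, 1], [7], 1, true)
def pvDiffWitnessOut_insert_before : (List Int) × (List Int) := ([7, 1], [7, 1, 7, 1])

-- ===== CLAIM (what is proved, stated in full; the proofs are below) =====
def Claim_unchanged_insert_before : Prop := ∀ (lst : List Int) (sub : List Int) (elem : Int) (_all : Bool), Dom_insert_before lst sub elem _all → Pre_insert_before lst sub elem _all → Spec_insert_before lst sub elem _all (insert_before lst sub elem _all)
def Claim_changed_insert_before : Prop := Dom_insert_before (pvDiffWitness_insert_before.1) (pvDiffWitness_insert_before.2.1) (pvDiffWitness_insert_before.2.2.1) (pvDiffWitness_insert_before.2.2.2) ∧ Pre_insert_before (pvDiffWitness_insert_before.1) (pvDiffWitness_insert_before.2.1) (pvDiffWitness_insert_before.2.2.1) (pvDiffWitness_insert_before.2.2.2) ∧ D_insert_before (pvDiffWitness_insert_before.1) (pvDiffWitness_insert_before.2.1) (pvDiffWitness_insert_before.2.2.1) (pvDiffWitness_insert_before.2.2.2) ∧ insert_before (pvDiffWitness_insert_before.1) (pvDiffWitness_insert_before.2.1) (pvDiffWitness_insert_before.2.2.1) (pvDiffWitness_insert_before.2.2.2)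 = pvDiffWitnessOut_insert_before.1 ∧ insert_before_alt (pvDiffWitness_insert_before.1) (pvDiffWitness_insert_before.2.1) (pvDiffWitness_insert_before.2.2.1) (pvDiffWitness_insert_before.2.2.2) = pvDiffWitnessOut_insert_before.2 ∧ pvDiffWitnessOut_insert_before.1 ≠ pvDiffWitnessOut_insert_before.2
def Claim_exact_insert_before : Prop := ∀ (lst : List Int) (sub : List Int) (elem : Int) (_all : Bool), Dom_insert_before lst sub elem _all → Pre_insert_before lst sub elem _all → D_insert_before lst sub elem _all → insert_before lst sub elem _all ≠ insert_before_alt lst sub elem _all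

-- ===== LEMMAS AND PROOFS =====

-- A's _all=True pipeline applied to lst (abbreviation for the proofs).
def pvAProc (sub : List Int) (elem : Int) (lst : List Int) : List Int :=
  pvFlatten (((pvRuns elem lst).map (fun kg => if kg.1 then ([] : List Int) else kg.2)).map
    (fun s => if s.isEmpty then sub ++ [elem] ++ s else s))

-- B's _all=True comprehension.
def pvBProc (sub : List Int) (elem : Int) (lst : List Int) : List Int :=
  lst.flatMap (fun x => if x == elem then sub ++ [x] else [x])

lemma pvRuns_cons (elem x : Int) (xs : List Int) :
    pvRuns elem (x :: xs)
      = match pvRuns elem xs with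
        | [] => [(x == elem, [x])]
        | (k, g) :: rest =>
          if (x == elem) == k then (k, x :: g) :: rest
          else (x == elem, [x]) :: (k, g) :: rest := rfl

lemma runs_cons_head (elem y : Int) (ys : List Int) :
    ∃ g rest, pvRuns elem (y :: ys) = ((y == elem), g) :: rest ∧ g ≠ [] := by
  cases h : pvRuns elem ys with
  | nil => exact ⟨[y], [], by rw [pvRuns_cons, h], by simp⟩
  | cons kg rest =>
    obtain ⟨k, g⟩ := kg
    by_cases hk : (y == elem) = k
    · exact ⟨y :: g, rest, by rw [pvRuns_cons, h]; simp [hk], by simp⟩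
    · exact ⟨[y], (k, g) :: rest, by rw [pvRuns_cons, h]; simp [hk], by simp⟩

lemma pvAProc_eq_of_no_adj (sub : List Int) (elem : Int) :
    ∀ lst : List Int, pvAdjDup elem lst = false →
      pvAProc sub elem lst = pvBProc sub elem lst := by
  intro lst
  induction lst with
  | nil => intro _; rfl
  | cons x xs ih =>
    intro hadj
    cases xs with
    | nil =>
      by_cases hx : x = elem
      · subst hx; simp [pvAProc, pvBProc, pvRuns, pvFlatten]
      · simp [pvAProc, pvBProc, pvRuns, pvFlatten, hx]
    | cons y ys =>
      have hadj' : ((x == elem) && (y == elem)) = false ∧ pvAdjDup elem (y :: ys) = false := by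
        simpa [pvAdjDup] using hadj
      have ihy := ih hadj'.2
      obtain ⟨g, rest, hr, hg⟩ := runs_cons_head elem y ys
      cases hbx : (x == elem) with
      | true =>
        have hby : (y == elem) = false := by
          cases hby : (y == elem)
          · rfl
          · exfalso; have h1 := hadj'.1; rw [hbx, hby] at h1; simp at h1
        have hx : x = elem := by simpa using hbx
        have hy : y ≠ elem := by simpa using hby
        rw [hby] at hr
        have hrx : pvRuns elem (x :: y :: ys) = (true, [x]) :: (false, g) :: rest := by
          rw [pvRuns_cons, hr]; simp [hbx]
        calc pvAProc sub elem (x :: y :: ys)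
            = (sub ++ [elem]) ++ pvAProc sub elem (y :: ys) := by
              simp [pvAProc, hrx, hr, pvFlatten, hg]
          _ = (sub ++ [x]) ++ pvBProc sub elem (y :: ys) := by rw [ihy, hx]
          _ = pvBProc sub elem (x :: y :: ys) := by simp [pvBProc, hx]
      | false =>
        have hx : x ≠ elem := by simpa using hbx
        cases hby : (y == elem) with
        | true =>
          rw [hby] at hr
          have hrx : pvRuns elem (x :: y :: ys) = (false, [x]) :: (true, g) :: rest := by
            rw [pvRuns_cons, hr]; simp [hbx]
          calc pvAProc sub elem (x :: y :: ys)
              = [x] ++ pvAProc sub elem (y :: ys) := by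
                simp [pvAProc, hrx, hr, pvFlatten]
            _ = [x] ++ pvBProc sub elem (y :: ys) := by rw [ihy]
            _ = pvBProc sub elem (x :: y :: ys) := by simp [pvBProc, hx]
        | false =>
          rw [hby] at hr
          have hrx : pvRuns elem (x :: y :: ys) = (false, x :: g) :: rest := by
            rw [pvRuns_cons, hr]; simp [hbx]
          calc pvAProc sub elem (x :: y :: ys)
              = [x] ++ pvAProc sub elem (y :: ys) := by
                simp [pvAProc, hrx, hr, pvFlatten, hg]
            _ = [x] ++ pvBProc sub elem (y :: ys) := by rw [ihy]
            _ = pvBProc sub elem (x :: y :: ys) := by simp [pvBProc, hx]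

lemma pvAProc_len_le (sub : List Int) (elem : Int) :
    ∀ lst : List Int, (pvAProc sub elem lst).length ≤ (pvBProc sub elem lst).length := by
  intro lst
  induction lst with
  | nil => simp [pvAProc, pvBProc, pvRuns, pvFlatten]
  | cons x xs ih =>
    cases xs with
    | nil =>
      by_cases hx : x = elem
      · subst hx; simp [pvAProc, pvBProc, pvRuns, pvFlatten]
      · simp [pvAProc, pvBProc, pvRuns, pvFlatten, hx]
    | cons y ys =>
      obtain ⟨g, rest, hr, hg⟩ := runs_cons_head elem y ys
      cases hbx : (x == elem) with
      | true =>
        have hx : x = elem := by simpa using hbx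
        cases hby : (y == elem) with
        | true =>
          rw [hby] at hr
          have hrx : pvRuns elem (x :: y :: ys) = (true, x :: g) :: rest := by
            rw [pvRuns_cons, hr]; simp [hbx]
          have hAeq : pvAProc sub elem (x :: y :: ys) = pvAProc sub elem (y :: ys) := by
            simp [pvAProc, hrx, hr, pvFlatten]
          have hB : pvBProc sub elem (x :: y :: ys) = (sub ++ [x]) ++ pvBProc sub elem (y :: ys) := by
            simp [pvBProc, hx]
          rw [hAeq, hB]
          simp only [List.length_append, List.length_cons, List.length_nil]
          omega
        | false =>
          rw [hby] at hr
          have hrx : pvRuns elem (x :: y :: ys) = (true, [x]) :: (false, g) :: rest := by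
            rw [pvRuns_cons, hr]; simp [hbx]
          have hA : pvAProc sub elem (x :: y :: ys) = (sub ++ [elem]) ++ pvAProc sub elem (y :: ys) := by
            simp [pvAProc, hrx, hr, pvFlatten, hg]
          have hB : pvBProc sub elem (x :: y :: ys) = (sub ++ [x]) ++ pvBProc sub elem (y :: ys) := by
            simp [pvBProc, hx]
          rw [hA, hB]
          simp only [List.length_append, List.length_cons, List.length_nil]
          omega
      | false =>
        have hx : x ≠ elem := by simpa using hbx
        have hB : pvBProc sub elem (x :: y :: ys) = [x] ++ pvBProc sub elem (y :: ys) := by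
          simp [pvBProc, hx]
        cases hby : (y == elem) with
        | true =>
          rw [hby] at hr
          have hrx : pvRuns elem (x :: y :: ys) = (false, [x]) :: (true, g) :: rest := by
            rw [pvRuns_cons, hr]; simp [hbx]
          have hA : pvAProc sub elem (x :: y :: ys) = [x] ++ pvAProc sub elem (y :: ys) := by
            simp [pvAProc, hrx, hr, pvFlatten]
          rw [hA, hB]
          simp only [List.length_append, List.length_cons, List.length_nil]
          omega
        | false =>
          rw [hby] at hr
          have hrx : pvRuns elem (x :: y :: ys) = (false, x :: g) :: rest := by
            rw [pvRuns_cons, hr]; simp [hbx]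
          have hA : pvAProc sub elem (x :: y :: ys) = [x] ++ pvAProc sub elem (y :: ys) := by
            simp [pvAProc, hrx, hr, pvFlatten, hg]
          rw [hA, hB]
          simp only [List.length_append, List.length_cons, List.length_nil]
          omega

lemma pvAProc_len_lt (sub : List Int) (elem : Int) :
    ∀ lst : List Int, pvAdjDup elem lst = true →
      (pvAProc sub elem lst).length < (pvBProc sub elem lst).length := by
  intro lst
  induction lst with
  | nil => intro h; simp [pvAdjDup] at h
  | cons x xs ih =>
    intro hadj
    cases xs with
    | nil => simp [pvAdjDup] at hadj
    | cons y ys =>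
      obtain ⟨g, rest, hr, hg⟩ := runs_cons_head elem y ys
      have hcases : (x = elem ∧ y = elem) ∨ pvAdjDup elem (y :: ys) = true := by
        simpa [pvAdjDup] using hadj
      by_cases hpair : x = elem ∧ y = elem
      · obtain ⟨hx, hy⟩ := hpair
        have hbx : (x == elem) = true := by simp [hx]
        have hbyt : (y == elem) = true := by simp [hy]
        rw [hbyt] at hr
        have hrx : pvRuns elem (x :: y :: ys) = (true, x :: g) :: rest := by
          rw [pvRuns_cons, hr]; simp [hbx]
        have hAeq : pvAProc sub elem (x :: y :: ys) = pvAProc sub elem (y :: ys) := by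
          simp [pvAProc, hrx, hr, pvFlatten]
        have hB : pvBProc sub elem (x :: y :: ys) = (sub ++ [x]) ++ pvBProc sub elem (y :: ys) := by
          simp [pvBProc, hx]
        have hle := pvAProc_len_le sub elem (y :: ys)
        rw [hAeq, hB]
        simp only [List.length_append, List.length_cons, List.length_nil]
        omega
      · have hadj' : pvAdjDup elem (y :: ys) = true := hcases.resolve_left hpair
        have iht := ih hadj'
        cases hbx : (x == elem) with
        | true =>
          have hx : x = elem := by simpa using hbx
          have hy : y ≠ elem := fun h => hpair ⟨hx, h⟩
          have hby : (y == elem) = false := by simp [hy]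
          rw [hby] at hr
          have hrx : pvRuns elem (x :: y :: ys) = (true, [x]) :: (false, g) :: rest := by
            rw [pvRuns_cons, hr]; simp [hbx]
          have hA : pvAProc sub elem (x :: y :: ys) = (sub ++ [elem]) ++ pvAProc sub elem (y :: ys) := by
            simp [pvAProc, hrx, hr, pvFlatten, hg]
          have hB : pvBProc sub elem (x :: y :: ys) = (sub ++ [x]) ++ pvBProc sub elem (y :: ys) := by
            simp [pvBProc, hx]
          rw [hA, hB]
          simp only [List.length_append, List.length_cons, List.length_nil]
          omega
        | false =>
          have hx : x ≠ elem := by simpa using hbx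
          have hB : pvBProc sub elem (x :: y :: ys) = [x] ++ pvBProc sub elem (y :: ys) := by
            simp [pvBProc, hx]
          cases hby : (y == elem) with
          | true =>
            rw [hby] at hr
            have hrx : pvRuns elem (x :: y :: ys) = (false, [x]) :: (true, g) :: rest := by
              rw [pvRuns_cons, hr]; simp [hbx]
            have hA : pvAProc sub elem (x :: y :: ys) = [x] ++ pvAProc sub elem (y :: ys) := by
              simp [pvAProc, hrx, hr, pvFlatten]
            rw [hA, hB]
            simp only [List.length_append, List.length_cons, List.length_nil]
            omega
          | false =>
            rw [hby] at hr
            have hrx : pvRuns elem (x :: y :: ys) = (false, x :: g) :: rest := by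
              rw [pvRuns_cons, hr]; simp [hbx]
            have hA : pvAProc sub elem (x :: y :: ys) = [x] ++ pvAProc sub elem (y :: ys) := by
              simp [pvAProc, hrx, hr, pvFlatten, hg]
            rw [hA, hB]
            simp only [List.length_append, List.length_cons, List.length_nil]
            omega

lemma insert_before_true_eq (lst sub : List Int) (elem : Int) :
    insert_before lst sub elem true = pvAProc sub elem lst := by
  simp [insert_before, pvAProc]

lemma insert_before_alt_true_eq (lst sub : List Int) (elem : Int) :
    insert_before_alt lst sub elem true = pvBProc sub elem lst := by
  simp [insert_before_alt, pvBProc]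

-- ===== VERDICT (by name: the statement is the Claim_ definition above) =====
theorem insert_before_spec : Claim_unchanged_insert_before := by
  intro lst sub elem _all _ _ hnd
  cases _all with
  | false => rfl
  | true =>
    have hadj : pvAdjDup elem lst = false := by
      cases h : pvAdjDup elem lst
      · rfl
      · exact absurd ⟨rfl, h⟩ hnd
    show insert_before lst sub elem true = insert_before_alt lst sub elem true
    rw [insert_before_true_eq, insert_before_alt_true_eq]
    exact pvAProc_eq_of_no_adj sub elem lst hadj

theorem insert_before_changed : Claim_changed_insert_before := by
  unfold Claim_changed_insert_before; decide

theorem insert_before_tight : Claim_exact_insert_before := by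
  intro lst sub elem _all _ _ hd heq
  obtain ⟨ha, hadj⟩ := hd
  subst ha
  rw [insert_before_true_eq, insert_before_alt_true_eq] at heq
  have hlt := pvAProc_len_lt sub elem lst hadj
  rw [heq] at hlt
  omega
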